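-- pv_equiv track=rewrite | github.com/immunogenomics/RA_ATAC_multiome | scripts/QC/bam_dedup.py | keepLine
-- ===== SOURCE A (Python) =====
-- def keepLine(flag):
--     badIndices = [2,3,8,9,11] #SAM flag shouldn't have any of these bits set
--     goodIndices = [0,1] #SAM flag should have all of these bits set
--     notEqualIndices = [(4,5),(6,7)] #SAM flag should not have both bits in the pair set or both bits unset
--
--     ignore = 0
--     for b in badIndices:
--         ignore |= (flag >> b & 1)
--     for b in notEqualIndices:
--         if (flag >> b[0] & 1) == (flag >> b[1] & 1):
--             ignore |= 1
--         else:
--             ignore |= 0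
--
--     keep = 1
--     for b in goodIndices:
--         keep &= (flag >> b & 1)
--
--     final = ~ignore & keep
--     return final
-- ===== SOURCE B (Python) =====
-- # Table lookup: the filter only looks at the low 12 flag bits, and exactly 8
-- # 12-bit patterns pass (bits 0,1 set; bits 2,3,8,9,11 clear; exactly one of
-- # bits 4/5 and one of bits 6/7 set; bit 10 free).  Enumerate them once,
-- # combinatorially, and answer by a masked set lookup.
-- _KEEP = {3 + a + b + c for a in (16, 32) for b in (64, 128) for c in (0, 1024)}
--
-- def keepLine(flag):
--     return 1 if (flag & 0xFFF) in _KEEP else 0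
-- ===== Notes on version B (the rewrite author's own statement) =====
-- stated objective: alternative
-- what changed: Replaced A's three bit-accumulating loops and the final ~ignore & keep trick by a precomputed 8-element lookup set of the valid low-12-bit flag patterns, so keepLine is a single mask-and-membership test.
import Mathlib
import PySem

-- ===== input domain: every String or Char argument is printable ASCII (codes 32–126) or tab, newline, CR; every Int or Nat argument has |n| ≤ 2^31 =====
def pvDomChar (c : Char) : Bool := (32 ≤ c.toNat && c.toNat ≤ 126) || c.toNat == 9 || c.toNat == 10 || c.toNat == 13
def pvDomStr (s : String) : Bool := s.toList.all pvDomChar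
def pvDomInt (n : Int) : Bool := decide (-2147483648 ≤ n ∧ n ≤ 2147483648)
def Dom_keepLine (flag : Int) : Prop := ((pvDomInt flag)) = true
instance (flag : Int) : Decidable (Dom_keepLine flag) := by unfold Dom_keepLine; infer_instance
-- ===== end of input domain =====

-- B replaces A's three bit-accumulating loops and the '~ignore & keep' trick by a
-- precomputed 8-element table of the valid low-12-bit flag patterns and a masked
-- membership test (objective: alternative).


-- ===== PORT A =====
-- 'flag >> b' is Lean's '>>>' on Int (arithmetic shift, Python-exact); '&' and '|' are PySem.Int.band/bor; '~' is Int.not.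
def keepLine (flag : Int) : Int :=
  let badIndices : List Int := [2, 3, 8, 9, 11]
  let goodIndices : List Int := [0, 1]
  let notEqualIndices : List (Int × Int) := [(4, 5), (6, 7)]
  let ignore : Int :=
    badIndices.foldl (fun ig b => PySem.Int.bor ig (PySem.Int.band (flag >>> b) 1)) 0
  let ignore : Int :=
    notEqualIndices.foldl
      (fun ig b =>
        if PySem.Int.band (flag >>> b.1) 1 = PySem.Int.band (flag >>> b.2) 1 then
          PySem.Int.bor ig 1
        else
          PySem.Int.bor ig 0) ignore
  let keep : Int :=
    goodIndices.foldl (fun k b => PySem.Int.band k (PySem.Int.band (flag >>> b) 1)) 1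
  PySem.Int.band (Int.not ignore) keep

-- ===== PORT B =====
-- the precomputed set literal _KEEP of Source B (8 distinct values, insertion order)
def pvKeepTable : List Int := [83, 147, 1107, 1171, 99, 163, 1123, 1187]
-- '1 if (flag & 0xFFF) in _KEEP else 0'
def keepLine_alt (flag : Int) : Int :=
  if PySem.Int.band flag 4095 ∈ pvKeepTable then 1 else 0

-- ===== PRECONDITION & SPEC =====
-- A is total on Int: no Pre_.
def Spec_keepLine (flag : Int) (out : Int) : Prop := out = keepLine_alt flag
instance (flag : Int) (out : Int) : Decidable (Spec_keepLine flag out) := by unfold Spec_keepLine; infer_instance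

-- ===== CLAIM (what is proved, stated in full; the proofs are below) =====
def Claim_equal_keepLine : Prop := ∀ (flag : Int), Dom_keepLine flag → Spec_keepLine flag (keepLine flag)

-- ===== LEMMAS AND PROOFS =====
-- bit k of flag as a Bool (proof helper only)
def pvBitB (a : Int) (k : Nat) : Bool := decide ((a / (2 ^ k : Int)) % 2 = 1)

theorem pvBitB_eq (a : Int) (k : Nat) :
    (a / (2 ^ k : Int)) % 2 = cond (pvBitB a k) 1 0 := by
  unfold pvBitB
  have h : (a / (2 ^ k : Int)) % 2 = 0 ∨ (a / (2 ^ k : Int)) % 2 = 1 := by omega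
  rcases h with h | h <;> rw [h] <;> decide

-- an A-side atom '(flag >> i) & 1' (already reduced by band_one to 'mod … 2') as a bit
theorem pvModBit (a : Int) (i : Int) (k : Nat) (h : i = (k : Int)) :
    PySem.Int.mod (a >>> i) 2 = cond (pvBitB a k) 1 0 := by
  subst h
  rw [Int.shiftRight_natCast_right, Int.shiftRight_eq_div_pow]
  show Int.fmod _ _ = _
  rw [Int.fmod_eq_emod, if_pos (Or.inl (by norm_num : (0:Int) ≤ 2))]
  push_cast
  rw [pvBitB_eq]
  ring

-- 'flag & 0xFFF' = flag mod 4096 (Python mask of the low 12 bits)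
theorem pvMask (a : Int) : PySem.Int.band a 4095 = a % 4096 := by
  unfold PySem.Int.band
  have h4 : ((4095:Int).toNat) = 4095 := rfl
  split_ifs with h1 h2 h2
  · rw [h4]
    have := Nat.and_two_pow_sub_one_eq_mod a.toNat 12
    norm_num at this
    omega
  · norm_num at h2
  · rw [h4]
    have hm : (((-a - 1).toNat : Int)) = -a - 1 := by omega
    generalize hM : (-a - 1).toNat = m at *
    have hand : 4095 &&& m = m % 4096 := by
      rw [Nat.and_comm]
      have := Nat.and_two_pow_sub_one_eq_mod m 12
      norm_num at this
      exact this
    omega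
  · norm_num at h2

-- the mask as a sum of its 12 bits
theorem pvMaskBits (a : Int) :
    PySem.Int.band a 4095 =
      cond (pvBitB a 0) 1 0 + 2 * cond (pvBitB a 1) 1 0 + 4 * cond (pvBitB a 2) 1 0 +
      8 * cond (pvBitB a 3) 1 0 + 16 * cond (pvBitB a 4) 1 0 + 32 * cond (pvBitB a 5) 1 0 +
      64 * cond (pvBitB a 6) 1 0 + 128 * cond (pvBitB a 7) 1 0 + 256 * cond (pvBitB a 8) 1 0 +
      512 * cond (pvBitB a 9) 1 0 + 1024 * cond (pvBitB a 10) 1 0 + 2048 * cond (pvBitB a 11) 1 0 := by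
  rw [pvMask, ← pvBitB_eq a 0, ← pvBitB_eq a 1, ← pvBitB_eq a 2, ← pvBitB_eq a 3,
    ← pvBitB_eq a 4, ← pvBitB_eq a 5, ← pvBitB_eq a 6, ← pvBitB_eq a 7, ← pvBitB_eq a 8,
    ← pvBitB_eq a 9, ← pvBitB_eq a 10, ← pvBitB_eq a 11]
  norm_num
  omega

-- ===== VERDICT (by name: the statement is the Claim_ definition above) =====
set_option maxHeartbeats 2000000 in
theorem keepLine_spec : Claim_equal_keepLine := by
  intro flag _
  unfold Spec_keepLine keepLine keepLine_alt
  simp only [List.foldl, PySem.Int.band_one]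
  rw [pvMaskBits,
    pvModBit flag 0 0 (by norm_num), pvModBit flag 1 1 (by norm_num),
    pvModBit flag 2 2 (by norm_num), pvModBit flag 3 3 (by norm_num),
    pvModBit flag 4 4 (by norm_num), pvModBit flag 5 5 (by norm_num),
    pvModBit flag 6 6 (by norm_num), pvModBit flag 7 7 (by norm_num),
    pvModBit flag 8 8 (by norm_num), pvModBit flag 9 9 (by norm_num),
    pvModBit flag 11 11 (by norm_num)]
  generalize pvBitB flag 0 = b0
  generalize pvBitB flag 1 = b1
  generalize pvBitB flag 2 = b2
  generalize pvBitB flag 3 = b3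
  generalize pvBitB flag 4 = b4
  generalize pvBitB flag 5 = b5
  generalize pvBitB flag 6 = b6
  generalize pvBitB flag 7 = b7
  generalize pvBitB flag 8 = b8
  generalize pvBitB flag 9 = b9
  generalize pvBitB flag 10 = b10
  generalize pvBitB flag 11 = b11
  revert b0 b1 b2 b3 b4 b5 b6 b7 b8 b9 b10 b11
  decide
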